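-- pv_equiv track=rewrite | github.com/Imtiaz-Ud/STAT_4185_Assignment_1 | decrypt_message_two.py | decrypt_transposition
-- ===== SOURCE A (Python) =====
-- def decrypt_transposition(encrypted_text):
--
--     char_list = list(encrypted_text)
--
--     n = len(char_list)
--     mid_point = n // 2
--
--
--     start, end = 1, -2
--
--
--     while start < mid_point:
--
--         char_list[start], char_list[end] = char_list[end], char_list[start]
--         start += 2
--         end -= 2
--
--
--     return ''.join(char_list)
-- ===== SOURCE B (Python) =====
-- def decrypt_transposition(encrypted_text):
--     n = len(encrypted_text)
--     half = n // 2
--     def src(i):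
--         j = n - 1 - i
--         if i % 2 == 1 and i < half:
--             return j
--         if j % 2 == 1 and j < half:
--             return j
--         return i
--     return ''.join(encrypted_text[src(i)] for i in range(n))
-- ===== Notes on version B (the rewrite author's own statement) =====
-- stated objective: alternative
-- what changed: Replaces A's in-place two-pointer mutation loop (swapping char_list[start] with char_list[end] while walking inward) by a pure single pass that, for each output position i, computes the source index directly (mirror n-1-i when i or its mirror is an odd index below n//2, else i) and gathers the characters with a comprehension.
import Mathlib
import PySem

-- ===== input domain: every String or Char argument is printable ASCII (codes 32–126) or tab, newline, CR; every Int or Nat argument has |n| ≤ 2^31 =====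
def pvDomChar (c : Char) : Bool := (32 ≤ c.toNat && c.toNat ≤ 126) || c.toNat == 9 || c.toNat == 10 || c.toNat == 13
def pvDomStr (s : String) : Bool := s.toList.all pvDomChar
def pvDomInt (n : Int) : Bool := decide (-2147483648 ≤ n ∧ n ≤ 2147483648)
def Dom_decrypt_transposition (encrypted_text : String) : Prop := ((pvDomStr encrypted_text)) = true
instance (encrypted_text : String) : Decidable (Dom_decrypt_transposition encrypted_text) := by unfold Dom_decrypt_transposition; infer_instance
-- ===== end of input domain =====

-- B replaces A's in-place two-pointer swap loop by a pure index-map pass (objective: alternative decomposition, same cost).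

-- ===== PORT A =====
-- while start < mid_point: swap char_list[start], char_list[end]; start += 2; end -= 2
-- pyGetD/pySetD are exact here: every index the loop touches is in range (1 ≤ start < n//2, -n ≤ end ≤ -2).
def pvLoopA (mid : Int) (xs : List Char) (s e : Int) : List Char :=
  if s < mid then
    pvLoopA mid
      (PySem.List.pySetD (PySem.List.pySetD xs s (PySem.List.pyGetD xs e ' ')) e
        (PySem.List.pyGetD xs s ' '))
      (s + 2) (e - 2)
  else xs
termination_by (mid - s).toNat
decreasing_by omega

def decrypt_transposition (encrypted_text : String) : String :=
  let char_list := encrypted_text.toList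
  let n : Int := char_list.length
  let mid_point : Int := n / 2
  String.mk (pvLoopA mid_point char_list 1 (-2))

-- ===== PORT B =====
def pvSrc (n i : Nat) : Nat :=
  let j := n - 1 - i
  if i % 2 = 1 ∧ i < n / 2 then j
  else if j % 2 = 1 ∧ j < n / 2 then j
  else i

def decrypt_transposition_alt (encrypted_text : String) : String :=
  let xs := encrypted_text.toList
  let n := xs.length
  String.mk ((List.range n).map (fun i => xs.getD (pvSrc n i) ' '))

-- ===== PRECONDITION & SPEC =====
def Spec_decrypt_transposition (encrypted_text : String) (out : String) : Prop := out = decrypt_transposition_alt encrypted_text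
instance (encrypted_text : String) (out : String) : Decidable (Spec_decrypt_transposition encrypted_text out) := by unfold Spec_decrypt_transposition; infer_instance

-- ===== CLAIM (what is proved, stated in full; the proofs are below) =====
def Claim_equal_decrypt_transposition : Prop := ∀ (encrypted_text : String), Dom_decrypt_transposition encrypted_text → Spec_decrypt_transposition encrypted_text (decrypt_transposition encrypted_text)

-- ===== LEMMAS AND PROOFS =====

-- The source index realised by A's loop once it has already processed all swap positions below s.
def pvG (s n i : Nat) : Nat :=
  if i % 2 = s % 2 ∧ s ≤ i ∧ i < n / 2 then n - 1 - i
  else if (n - 1 - i) % 2 = s % 2 ∧ s ≤ n - 1 - i ∧ n - 1 - i < n / 2 then n - 1 - i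
  else i

lemma pvG_lt {s n i : Nat} (hi : i < n) : pvG s n i < n := by
  unfold pvG; split_ifs <;> omega

lemma map_getD_range (xs : List Char) :
    (List.range xs.length).map (fun i => xs.getD i ' ') = xs := by
  apply List.ext_getElem
  · simp
  · intro i h1 h2
    simp [List.getD_eq_getElem?_getD, List.getElem?_eq_getElem h2]

lemma pvSetD_neg_natCast (ys : List Char) (k : Nat) (v : Char) (h1 : 0 < k) (h2 : k ≤ ys.length) :
    PySem.List.pySetD ys (-(k : Int)) v = ys.set (ys.length - k) v := by
  simp only [PySem.List.pySetD, PySem.List.pySet?, PySem.List.pyIdx?]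
  rw [if_neg (by omega), if_pos (by omega)]
  simp

lemma pvG_done (s n i : Nat) (h : n / 2 ≤ s) : pvG s n i = i := by
  unfold pvG; split_ifs <;> omega

lemma step_point (xs : List Char) (s i : Nat) (hs : s < xs.length / 2) (hi : i < xs.length)
    (hm : xs.length - 1 - s < xs.length) (hss : s < xs.length) :
    ((xs.set s (xs[xs.length - 1 - s])).set (xs.length - 1 - s) (xs[s])).getD
        (pvG (s + 2) xs.length i) ' '
      = xs.getD (pvG s xs.length i) ' ' := by
  have hg2 : pvG (s + 2) xs.length i < xs.length := pvG_lt hi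
  have hg1 : pvG s xs.length i < xs.length := pvG_lt hi
  rw [List.getD_eq_getElem _ _ (by simpa using hg2), List.getD_eq_getElem _ _ hg1]
  simp only [List.getElem_set]
  by_cases his : i = s
  · subst his
    have e2 : pvG (i + 2) xs.length i = i := by unfold pvG; split_ifs <;> omega
    have e1 : pvG i xs.length i = xs.length - 1 - i := by unfold pvG; split_ifs <;> omega
    simp only [e1, e2]
    split_ifs <;> first | rfl | omega
  · by_cases him : i = xs.length - 1 - s
    · subst him
      have e2 : pvG (s + 2) xs.length (xs.length - 1 - s) = xs.length - 1 - s := by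
        unfold pvG; split_ifs <;> omega
      have e1 : pvG s xs.length (xs.length - 1 - s) = s := by
        unfold pvG; split_ifs <;> omega
      simp only [e1, e2]
      split_ifs <;> rfl
    · have hG : pvG (s + 2) xs.length i = pvG s xs.length i := by
        unfold pvG; split_ifs <;> omega
      have hne1 : pvG s xs.length i ≠ xs.length - 1 - s := by
        unfold pvG; split_ifs <;> omega
      have hne2 : pvG s xs.length i ≠ s := by
        unfold pvG; split_ifs <;> omega
      simp only [hG]
      split_ifs <;> first | rfl | omega

lemma loop_eq (k : Nat) : ∀ (xs : List Char) (s : Nat), xs.length / 2 ≤ s + k →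
    pvLoopA ((xs.length : Int) / 2) xs (s : Int) (-((s : Int) + 1))
      = (List.range xs.length).map (fun i => xs.getD (pvG s xs.length i) ' ') := by
  induction k with
  | zero =>
      intro xs s h
      rw [pvLoopA, if_neg (by omega)]
      conv_rhs => rw [List.map_congr_left (fun i hi => by rw [pvG_done s xs.length i (by omega)])]
      rw [map_getD_range]
  | succ k ih =>
      intro xs s h
      by_cases hlt : s < xs.length / 2
      · have hss : s < xs.length := by omega
        have hm : xs.length - 1 - s < xs.length := by omega
        rw [pvLoopA, if_pos (by omega)]
        have he : -((s : Int) + 1) = -(((s + 1 : Nat) : Int)) := by push_cast; ring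
        rw [he, PySem.List.pyGetD_neg_natCast _ _ _ (by omega) (by omega)]
        simp only [PySem.List.pyGetD_natCast, PySem.List.pySetD_natCast]
        rw [pvSetD_neg_natCast _ _ _ (by omega) (by simp; omega)]
        have harg1 : (s : Int) + 2 = ((s + 2 : Nat) : Int) := by push_cast; ring
        have harg2 : -(((s + 1 : Nat) : Int)) - 2 = -(((s + 2 : Nat) : Int) + 1) := by
          push_cast; ring
        rw [harg1, harg2]
        have hL : (xs.set s (xs[xs.length - (s + 1)]'(by omega))).length = xs.length := by simp
        rw [hL]
        set ys := (xs.set s (xs[xs.length - (s + 1)]'(by omega))).set (xs.length - (s + 1))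
          (xs.getD s ' ') with hys
        have hyl : ys.length = xs.length := by simp [hys]
        calc pvLoopA ((xs.length : Int) / 2) ys ((s + 2 : Nat) : Int)
                (-(((s + 2 : Nat) : Int) + 1))
            = pvLoopA ((ys.length : Int) / 2) ys ((s + 2 : Nat) : Int)
                (-(((s + 2 : Nat) : Int) + 1)) := by rw [hyl]
          _ = (List.range ys.length).map (fun i => ys.getD (pvG (s + 2) ys.length i) ' ') :=
              ih ys (s + 2) (by rw [hyl]; omega)
          _ = (List.range xs.length).map (fun i => xs.getD (pvG s xs.length i) ' ') := by
              rw [hyl]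
              apply List.map_congr_left
              intro i hi
              rw [List.mem_range] at hi
              have h1 : xs.length - (s + 1) = xs.length - 1 - s := by omega
              have hgd : xs.getD s ' ' = xs[s] := List.getD_eq_getElem _ _ hss
              rw [hys]
              simp only [h1, hgd]
              exact step_point xs s i hlt hi hm hss
      · rw [pvLoopA, if_neg (by omega)]
        conv_rhs => rw [List.map_congr_left (fun i hi => by rw [pvG_done s xs.length i (by omega)])]
        rw [map_getD_range]

lemma pvG_one_eq_src (n i : Nat) : pvG 1 n i = pvSrc n i := by
  unfold pvG pvSrc
  dsimp only
  split_ifs <;> first | rfl | omega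

-- ===== VERDICT (by name: the statement is the Claim_ definition above) =====
theorem decrypt_transposition_spec : Claim_equal_decrypt_transposition := by
  intro t _
  unfold Spec_decrypt_transposition decrypt_transposition decrypt_transposition_alt
  dsimp only
  have h1 : (1 : Int) = ((1 : Nat) : Int) := by norm_num
  have h2 : (-2 : Int) = -(((1 : Nat) : Int) + 1) := by norm_num
  rw [h1, h2, loop_eq (t.toList.length / 2) t.toList 1 (by omega)]
  congr 1
  apply List.map_congr_left
  intro i hi
  rw [pvG_one_eq_src]
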